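-- pv_equiv track=rewrite | github.com/naturalstupid/PyJHora | src/jhora/utils.py | parivritti_even_reverse
-- ===== SOURCE A (Python) =====
-- def parivritti_even_reverse(dcf,dirn=1):
--     """
--         generates parivritti tuple (rasi_sign, hora_portion_of_varga, varga_sign)
--         in this method for varga factor = 2 (hora chart)
--             for the first sign hora portion increases from 0 to 1 (varga factor - 1)
--             for the next sign hora portion decreases from 1 to 0
--             for rasi = 0 the tuples are (0,0,0), (0,1,1) (the middle hora element 0 and 1)
--             for next rasi = 1 (1,1,2), (1,0,3) (the middle hora element 1 and 0)
--         in this method for varga factor = 3 (drekkana chart)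
--             for the first sign hora portion increases from 0 to 2
--             for the next sign hora portion decreases from 2 to 0
--             for rasi = 0 the tuples are (0,0,0), (0,1,1),(0,2,2) (the middle hora element increase 0,1,2)
--             for next rasi = 1 (1,2,3), (1,1,4), (1,0,5) (the middle hora element decrease 2,1,0)
--         @param varga divisional chart factor: 2=>Hora, 3=Drekkana etc
--         @return parivritti even reverse tuple
--     """
--     pc = []
--     hs = 0
--     for r in range(0,12,2):
--         for h in range(0,dcf):
--             pc.append((r,h,hs)); hs = (hs+dirn)%12
--         r += 1
--         for h in range(dcf-1,-1,-1):
--             pc.append((r,h,hs)); hs = (hs+dirn)%12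
--     return pc
-- ===== SOURCE B (Python) =====
-- def parivritti_even_reverse(dcf, dirn=1):
--     return [(r, h if r % 2 == 0 else dcf - 1 - h, ((r * dcf + h) * dirn) % 12)
--             for r in range(12) for h in range(dcf)]
-- ===== Notes on version B (the rewrite author's own statement) =====
-- stated objective: simpler
-- what changed: Replaces the mutated hs accumulator and the separate ascending/descending inner loops per even/odd sign pair with a single comprehension that computes each tuple directly from its position: hora is h or dcf-1-h by parity of r, and the varga sign is the closed form ((r*dcf+h)*dirn) % 12.
import Mathlib
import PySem

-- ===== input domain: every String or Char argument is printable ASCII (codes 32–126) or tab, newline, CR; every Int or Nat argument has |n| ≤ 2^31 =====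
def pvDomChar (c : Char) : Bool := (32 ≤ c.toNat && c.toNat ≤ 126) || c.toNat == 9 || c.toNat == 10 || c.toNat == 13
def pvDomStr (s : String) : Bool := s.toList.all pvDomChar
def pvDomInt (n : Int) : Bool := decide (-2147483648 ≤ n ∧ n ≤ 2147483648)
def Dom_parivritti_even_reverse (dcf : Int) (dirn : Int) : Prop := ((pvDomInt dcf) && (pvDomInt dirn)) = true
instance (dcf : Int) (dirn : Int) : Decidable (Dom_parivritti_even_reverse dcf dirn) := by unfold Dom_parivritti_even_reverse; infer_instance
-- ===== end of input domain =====

-- B replaces A's running hs accumulator and split even/odd inner loops by a single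
-- comprehension computing each tuple directly from its position (objective: simpler).

-- ===== PORT A =====
-- literal port: state (pc, hs); outer loop over range(0,12,2), two inner loops,
-- hs = (hs+dirn)%12 after each append (Python floor mod via PySem.Int.mod)
def parivritti_even_reverse (dcf : Int) (dirn : Int) : List (Int × Int × Int) :=
  let res := (PySem.List.pyRange 0 12 2).foldl (fun st r =>
    let st1 := (PySem.List.pyRange 0 dcf 1).foldl
      (fun st h => (st.1 ++ [(r, h, st.2)], PySem.Int.mod (st.2 + dirn) 12)) st
    let r := r + 1
    (PySem.List.pyRange (dcf - 1) (-1) (-1)).foldl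
      (fun st h => (st.1 ++ [(r, h, st.2)], PySem.Int.mod (st.2 + dirn) 12)) st1)
    (([] : List (Int × Int × Int)), (0 : Int))
  res.1

-- ===== PORT B =====
-- literal port of Source B's single comprehension
def parivritti_even_reverse_alt (dcf : Int) (dirn : Int) : List (Int × Int × Int) :=
  (PySem.List.pyRange 0 12 1).flatMap (fun r =>
    (PySem.List.pyRange 0 dcf 1).map (fun h =>
      (r, if PySem.Int.mod r 2 == 0 then h else dcf - 1 - h,
       PySem.Int.mod ((r * dcf + h) * dirn) 12)))

-- ===== PRECONDITION & SPEC =====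
def Spec_parivritti_even_reverse (dcf : Int) (dirn : Int) (out : List (Int × Int × Int)) : Prop := out = parivritti_even_reverse_alt dcf dirn
instance (dcf : Int) (dirn : Int) (out : List (Int × Int × Int)) : Decidable (Spec_parivritti_even_reverse dcf dirn out) := by unfold Spec_parivritti_even_reverse; infer_instance

-- ===== CLAIM (what is proved, stated in full; the proofs are below) =====
def Claim_equal_parivritti_even_reverse : Prop := ∀ (dcf : Int) (dirn : Int), Dom_parivritti_even_reverse dcf dirn → Spec_parivritti_even_reverse dcf dirn (parivritti_even_reverse dcf dirn)

-- ===== LEMMAS AND PROOFS =====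

-- the inner loop over the n elements g 0, …, g (n-1), started with hs = (k*dirn) % 12,
-- appends (r, g j, ((k+j)*dirn) % 12) for each j and leaves hs = ((k+n)*dirn) % 12
theorem pv_loop_eq (dirn r : Int) (g : Nat → Int) (n : Nat) :
    ∀ (pc : List (Int × Int × Int)) (k : Int),
    ((List.range n).map g).foldl
      (fun st h => (st.1 ++ [(r, h, st.2)], PySem.Int.mod (st.2 + dirn) 12))
      (pc, PySem.Int.mod (k * dirn) 12)
    = (pc ++ (List.range n).map (fun j => (r, g j, PySem.Int.mod ((k + j) * dirn) 12)),
       PySem.Int.mod ((k + n) * dirn) 12) := by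
  induction n with
  | zero => simp
  | succ n ih =>
    intro pc k
    rw [List.range_succ, List.map_append, List.foldl_append, ih]
    simp only [List.map_cons, List.map_nil, List.foldl_cons, List.foldl_nil,
      List.map_append, List.append_assoc]
    congr 1
    rw [PySem.Int.mod_eq_emod_of_pos (by norm_num : (0:Int) < 12),
        PySem.Int.mod_eq_emod_of_pos (by norm_num : (0:Int) < 12),
        PySem.Int.mod_eq_emod_of_pos (by norm_num : (0:Int) < 12)]
    rw [Int.emod_add_emod]
    congr 1
    push_cast
    ring

theorem pv_main (dcf dirn : Int) :
    parivritti_even_reverse dcf dirn = parivritti_even_reverse_alt dcf dirn := by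
  by_cases hle : dcf ≤ 0
  · -- all inner ranges empty
    unfold parivritti_even_reverse parivritti_even_reverse_alt
    rw [PySem.List.pyRange_one_eq_nil hle, PySem.List.pyRange_neg_one_eq_nil (by omega)]
    simp [PySem.List.pyRange]
  · obtain ⟨n, rfl⟩ : ∃ n : Nat, dcf = (n : Int) := ⟨dcf.toNat, by omega⟩
    unfold parivritti_even_reverse parivritti_even_reverse_alt
    have hasc : PySem.List.pyRange 0 (n : Int) 1 = (List.range n).map (fun k : Nat => (k : Int)) := by
      rw [PySem.List.pyRange_one]
      rw [show ((n : Int) - 0).toNat = n by omega]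
      exact List.map_congr_left (fun k _ => by omega)
    have hdesc : PySem.List.pyRange ((n : Int) - 1) (-1) (-1)
        = (List.range n).map (fun k : Nat => (n : Int) - 1 - (k : Int)) := by
      rw [PySem.List.pyRange_neg_one]
      rw [show ((n : Int) - 1 - (-1)).toNat = n by omega]
    have h2 : PySem.List.pyRange 0 12 2 = [0, 2, 4, 6, 8, 10] := by decide
    have h1 : PySem.List.pyRange 0 12 1 = [0,1,2,3,4,5,6,7,8,9,10,11] := by decide
    rw [hasc, hdesc, h2, h1]
    have h0 : (([] : List (Int × Int × Int)), (0 : Int))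
        = (([] : List (Int × Int × Int)), PySem.Int.mod (0 * dirn) 12) := by
      rw [PySem.Int.mod_eq_emod_of_pos (by norm_num : (0:Int) < 12)]; simp
    simp only [List.foldl_cons, List.foldl_nil]
    rw [h0]
    rw [pv_loop_eq, pv_loop_eq, pv_loop_eq, pv_loop_eq, pv_loop_eq, pv_loop_eq,
        pv_loop_eq, pv_loop_eq, pv_loop_eq, pv_loop_eq, pv_loop_eq, pv_loop_eq]
    simp only [List.flatMap_cons, List.flatMap_nil, List.append_nil, List.append_assoc,
      List.map_map]
    norm_num
    repeat'
      first
        | rfl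
        | (refine List.map_congr_left fun j _ => ?_
           simp only [Function.comp_apply, Prod.mk.injEq]
           refine ⟨by norm_num, by norm_num, by congr 1; ring⟩)
        | congr 1

-- ===== VERDICT (by name: the statement is the Claim_ definition above) =====
theorem parivritti_even_reverse_spec : Claim_equal_parivritti_even_reverse := by
  intro dcf dirn _
  unfold Spec_parivritti_even_reverse
  exact pv_main dcf dirn
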